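-- pv_equiv track=rewrite | github.com/ruotu55/Football-site | Main Runner - Player stats/run_site.py | _is_valid_windows_filename_stem
-- ===== SOURCE A (Python) =====
-- def _is_valid_windows_filename_stem(stem: str) -> bool:
--     if not stem or stem.endswith(" ") or stem.endswith("."):
--         return False
--     banned = '<>:"/\\|?*'
--     for ch in stem:
--         if ord(ch) < 32 or ch in banned:
--             return False
--     return True
-- ===== SOURCE B (Python) =====
-- _BAD = '<>:"/\\|?*' + ''.join(map(chr, range(32)))
--
--
-- def _is_valid_windows_filename_stem(stem: str) -> bool:
--     return bool(stem) and not stem.endswith((" ", ".")) and not any(c in stem for c in _BAD)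
-- ===== Notes on version B (the rewrite author's own statement) =====
-- stated objective: alternative
-- what changed: Inverts the traversal: instead of A's Python-level left-to-right scan testing each stem character against the banned rules, B iterates over the 41 forbidden characters (nine metacharacters plus the 32 control characters, built once at module level) and checks each for occurrence in the stem via C-level substring membership, with a tuple endswith for the trailing space/dot rule; correctness is a quantifier swap between scanning the stem and scanning the banned alphabet.
import Mathlib
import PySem

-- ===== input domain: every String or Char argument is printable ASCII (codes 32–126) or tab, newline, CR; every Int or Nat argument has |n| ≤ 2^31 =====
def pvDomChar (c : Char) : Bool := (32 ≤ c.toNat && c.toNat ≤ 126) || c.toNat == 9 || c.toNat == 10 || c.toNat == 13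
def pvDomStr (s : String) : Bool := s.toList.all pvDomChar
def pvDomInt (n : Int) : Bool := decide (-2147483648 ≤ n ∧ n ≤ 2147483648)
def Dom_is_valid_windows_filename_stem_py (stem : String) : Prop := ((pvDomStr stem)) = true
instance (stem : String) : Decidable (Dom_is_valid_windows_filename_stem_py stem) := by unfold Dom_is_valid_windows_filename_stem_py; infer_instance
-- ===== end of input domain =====

-- B inverts the traversal: it loops over the 41 forbidden characters and tests each for
-- occurrence in the stem, instead of A's single scan over the stem (objective: alternative).

-- ===== PORT A =====
-- the for-loop of A with its early return
def pvLoopA : List Char → Bool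
  | [] => true
  | ch :: rest =>
      if ch.toNat < 32 || ("<>:\"/\\|?*".toList.contains ch) then false else pvLoopA rest

def is_valid_windows_filename_stem_py (stem : String) : Bool :=
  if stem.toList.isEmpty || PySem.Str.endswith stem " " || PySem.Str.endswith stem "." then
    false
  else
    pvLoopA stem.toList

-- ===== PORT B =====
-- _BAD = '<>:"/\\|?*' + ''.join(map(chr, range(32)))
def pvBadB : List Char := "<>:\"/\\|?*".toList ++ (List.range 32).map Char.ofNat

-- bool(stem) and not stem.endswith((" ", ".")) and not any(c in stem for c in _BAD)
def is_valid_windows_filename_stem_py_alt (stem : String) : Bool :=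
  !stem.toList.isEmpty &&
  !(PySem.Str.endswith stem " " || PySem.Str.endswith stem ".") &&
  !(pvBadB.any (fun c => stem.toList.contains c))

-- ===== PRECONDITION & SPEC =====
def Spec_is_valid_windows_filename_stem_py (stem : String) (out : Bool) : Prop := out = is_valid_windows_filename_stem_py_alt stem
instance (stem : String) (out : Bool) : Decidable (Spec_is_valid_windows_filename_stem_py stem out) := by unfold Spec_is_valid_windows_filename_stem_py; infer_instance

-- ===== CLAIM (what is proved, stated in full; the proofs are below) =====
def Claim_equal_is_valid_windows_filename_stem_py : Prop := ∀ (stem : String), Dom_is_valid_windows_filename_stem_py stem → Spec_is_valid_windows_filename_stem_py stem (is_valid_windows_filename_stem_py stem)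

-- ===== LEMMAS AND PROOFS =====

-- membership in chr-of-range(32) is exactly 'code point < 32'
theorem mem_range32_iff (c : Char) : c ∈ (List.range 32).map Char.ofNat ↔ c.toNat < 32 := by
  constructor
  · rintro h
    simp only [List.mem_map, List.mem_range] at h
    obtain ⟨i, hi, rfl⟩ := h
    have : (Char.ofNat i).toNat = i := by
      simp [Char.ofNat, Char.ofNatAux, Char.toNat,
        dif_pos (Or.inl (show i < 0xd800 by omega) : Nat.isValidChar i)]
    omega
  · intro h
    exact List.mem_map.mpr ⟨c.toNat, List.mem_range.mpr h, by simp⟩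

-- A's loop body test is exactly membership in B's _BAD list
theorem bad_char_iff (c : Char) :
    (c.toNat < 32 ∨ c ∈ "<>:\"/\\|?*".toList) ↔ c ∈ pvBadB := by
  unfold pvBadB
  rw [List.mem_append, mem_range32_iff]
  tauto

-- A's scan over the stem equals B's scan over the banned characters (quantifier swap)
theorem loopA_eq_notAny (l : List Char) :
    pvLoopA l = !(pvBadB.any (fun c => l.contains c)) := by
  induction l with
  | nil => simp [pvLoopA]
  | cons c rest ih =>
      rw [pvLoopA]
      by_cases hb : c.toNat < 32 ∨ c ∈ "<>:\"/\\|?*".toList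
      · rw [if_pos (by simpa [List.contains_eq_mem] using hb)]
        have : pvBadB.any (fun x => (c :: rest).contains x) = true := by
          simp only [List.any_eq_true, List.contains_eq_mem, decide_eq_true_eq]
          exact ⟨c, (bad_char_iff c).mp hb, List.mem_cons_self⟩
        rw [this]; rfl
      · rw [if_neg (by simpa [List.contains_eq_mem] using hb), ih]
        congr 1
        rw [Bool.eq_iff_iff]
        simp only [List.any_eq_true, List.contains_eq_mem, decide_eq_true_eq, List.mem_cons]
        constructor
        · rintro ⟨x, hx, hm⟩; exact ⟨x, hx, .inr hm⟩
        · rintro ⟨x, hx, rfl | hm⟩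
          · exact absurd ((bad_char_iff x).mpr hx) (by tauto)
          · exact ⟨x, hx, hm⟩

-- ===== VERDICT (by name: the statement is the Claim_ definition above) =====
theorem is_valid_windows_filename_stem_py_spec : Claim_equal_is_valid_windows_filename_stem_py := by
  intro stem _
  unfold Spec_is_valid_windows_filename_stem_py
  unfold is_valid_windows_filename_stem_py is_valid_windows_filename_stem_py_alt
  rw [loopA_eq_notAny]
  cases h1 : stem.toList.isEmpty <;>
    cases h2 : PySem.Str.endswith stem " " <;>
      cases h3 : PySem.Str.endswith stem "." <;> simp
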